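-- pv_equiv track=rewrite | github.com/iniakponode/data_sorter_app | app.py | map_column_to_data
-- ===== SOURCE A (Python) =====
-- def map_column_to_data(column, record_dict):
--     """Map a standard column name to extracted record data."""
--     column_upper = column.upper()
--
--     # Direct mappings
--     if column_upper == "NAME OF COOPERATIVE":
--         # Try multiple variations of cooperative names
--         for key in ['CO-OP NAME', 'COOP NAME', 'COOPERATIVE NAME', 'ORGANIZATION NAME']:
--             if key in record_dict:
--                 return record_dict[key]
--         return ""
--
--     elif column_upper == "CEO NAME":
--         # Try multiple variations of name fields (prioritize specific fields)
--         for key in ['CEO NAME', 'PERSONAL NAME']: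
--             if key in record_dict:
--                 return record_dict[key]
--
--         # Only use generic 'NAME' if it's clearly a person's name (not a bank/org name)
--         if 'NAME' in record_dict:
--             name_value = record_dict['NAME']
--             # Reject if it looks like a bank name, organization name, or cooperative name
--             if not any(word in name_value.upper() for word in [
--                 'BANK', 'ACCESS', 'ZENITH', 'FIRST', 'UBA', 'GTB', 'UNION', 'POLARIS',
--                 'FCMB', 'FIDELITY', 'STERLING', 'COOPERATIVE', 'SOCIETY', 'COMPANY',
--                 'ORGANIZATION', 'ENTERPRISE', 'LIMITED', 'LTD', 'PLC', 'COOP', 'NGO',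
--                 'PROBLEM'  # Also reject test data names
--             ]) and len(name_value.split()) <= 3:  # Person names usually 1-3 words
--                 return name_value
--
--         return ""
--
--     elif column_upper == "PHONE NO.":
--         # Try multiple variations of phone fields
--         for key in ['PHONE NO', 'PERSONAL PHONE NO', 'PHONE NUMBER', 'PHONE']:
--             if key in record_dict:
--                 return record_dict[key]
--         return ""
--
--     elif column_upper == "BANK NAME":
--         # Try multiple variations of bank fields
--         for key in ['BANK NAME', 'PERSONAL BANK NAME', 'BANK']:
--             if key in record_dict:
--                 return record_dict[key]
--         return ""
--
--     elif column_upper == "ACNT. NO.":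
--         # Try multiple variations of account fields
--         for key in ['ACNT NO', 'ACCOUNT NO', 'PERSONAL ACNT NO', 'ACC NO']:
--             if key in record_dict:
--                 return record_dict[key]
--         return ""
--
--     elif column_upper == "SEX":
--         return record_dict.get('SEX', '')
--
--     else:
--         # For custom columns, try direct match first, then similar matches
--         if column in record_dict:
--             return record_dict[column]
--
--         # Try case-insensitive match
--         for key in record_dict:
--             if key.upper() == column_upper:
--                 return record_dict[key]
--
--         return ""
-- ===== SOURCE B (Python) =====
-- _CANDIDATES = {
--     "NAME OF COOPERATIVE": ['CO-OP NAME', 'COOP NAME', 'COOPERATIVE NAME', 'ORGANIZATION NAME'],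
--     "PHONE NO.": ['PHONE NO', 'PERSONAL PHONE NO', 'PHONE NUMBER', 'PHONE'],
--     "BANK NAME": ['BANK NAME', 'PERSONAL BANK NAME', 'BANK'],
--     "ACNT. NO.": ['ACNT NO', 'ACCOUNT NO', 'PERSONAL ACNT NO', 'ACC NO'],
-- }
--
-- _BAD_WORDS = [
--     'BANK', 'ACCESS', 'ZENITH', 'FIRST', 'UBA', 'GTB', 'UNION', 'POLARIS',
--     'FCMB', 'FIDELITY', 'STERLING', 'COOPERATIVE', 'SOCIETY', 'COMPANY',
--     'ORGANIZATION', 'ENTERPRISE', 'LIMITED', 'LTD', 'PLC', 'COOP', 'NGO',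
--     'PROBLEM'
-- ]
--
--
-- def map_column_to_data(column, record_dict):
--     """Map a standard column name to extracted record data."""
--     column_upper = column.upper()
--
--     if column_upper in _CANDIDATES:
--         # One pass over the record: keep the value of the highest-priority
--         # (lowest-ranked) candidate key seen so far.
--         ranks = {k: i for i, k in enumerate(_CANDIDATES[column_upper])}
--         best = None
--         for k, v in record_dict.items():
--             r = ranks.get(k)
--             if r is not None and (best is None or r < best[0]):
--                 best = (r, v)
--         return best[1] if best is not None else ""
--
--     if column_upper == "CEO NAME":
--         for k in ('CEO NAME', 'PERSONAL NAME'):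
--             v = record_dict.get(k)
--             if v is not None:
--                 return v
--         v = record_dict.get('NAME')
--         if v is not None and len(v.split()) <= 3 and not any(w in v.upper() for w in _BAD_WORDS):
--             return v
--         return ""
--
--     if column_upper == "SEX":
--         return record_dict.get('SEX', '')
--
--     # Custom column: one pass collecting both the exact match and the first
--     # case-insensitive match, preferring the exact one.
--     exact = None
--     ci = None
--     for k, v in record_dict.items():
--         if exact is None and k == column:
--             exact = v
--         if ci is None and k.upper() == column_upper:
--             ci = v
--     if exact is not None:
--         return exact
--     if ci is not None:
--         return ci
--     return ""
-- ===== Notes on version B (the rewrite author's own statement) =====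
-- stated objective: alternative
-- what changed: The four simple standard columns are served from a module-level candidate-key table and resolved by a single pass over the record that keeps the best-ranked candidate hit (instead of A's per-candidate membership probes), and the custom-column branch fuses A's exact lookup and case-insensitive key scan into one pass collecting both matches.
import Mathlib
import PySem

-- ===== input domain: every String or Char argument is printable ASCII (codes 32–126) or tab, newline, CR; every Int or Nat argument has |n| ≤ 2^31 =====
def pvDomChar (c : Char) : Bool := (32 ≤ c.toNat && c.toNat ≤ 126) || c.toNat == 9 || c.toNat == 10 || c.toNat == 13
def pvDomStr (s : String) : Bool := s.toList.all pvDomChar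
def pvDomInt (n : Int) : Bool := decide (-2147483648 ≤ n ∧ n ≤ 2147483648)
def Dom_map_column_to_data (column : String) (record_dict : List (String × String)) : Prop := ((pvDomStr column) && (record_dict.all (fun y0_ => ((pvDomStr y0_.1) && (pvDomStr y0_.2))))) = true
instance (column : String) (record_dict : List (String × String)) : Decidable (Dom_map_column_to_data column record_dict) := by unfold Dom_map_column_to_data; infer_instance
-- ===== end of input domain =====

-- B replaces A's per-candidate membership probes by a table of candidate key ranks and ONE pass
-- over the record keeping the best-ranked hit, and fuses the custom-column exact &
-- case-insensitive scans into a single pass (objective: alternative, same cost).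

-- ===== PORT A =====
def pvBadWords : List String :=
  ["BANK", "ACCESS", "ZENITH", "FIRST", "UBA", "GTB", "UNION", "POLARIS",
   "FCMB", "FIDELITY", "STERLING", "COOPERATIVE", "SOCIETY", "COMPANY",
   "ORGANIZATION", "ENTERPRISE", "LIMITED", "LTD", "PLC", "COOP", "NGO",
   "PROBLEM"]

-- 'for key in ks: if key in record_dict: return record_dict[key]'  (none = loop fell through)
def pvTryKeys (ks : List String) (d : PySem.Dict String String) : Option String :=
  match ks with
  | [] => none
  | k :: rest => if d.contains k then some ((d.get? k).getD "") else pvTryKeys rest d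

-- 'for key in record_dict: if key.upper() == column_upper: return record_dict[key]'
def pvCiScan (keys : List String) (d : PySem.Dict String String) (cu : String) : String :=
  match keys with
  | [] => ""
  | k :: rest => if PySem.Str.upper k == cu then (d.get? k).getD "" else pvCiScan rest d cu

def map_column_to_data (column : String) (record_dict : List (String × String)) : String :=
  let d : PySem.Dict String String := PySem.Dict.mk record_dict
  let column_upper := PySem.Str.upper column
  if column_upper == "NAME OF COOPERATIVE" then
    (pvTryKeys ["CO-OP NAME", "COOP NAME", "COOPERATIVE NAME", "ORGANIZATION NAME"] d).getD ""
  else if column_upper == "CEO NAME" then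
    match pvTryKeys ["CEO NAME", "PERSONAL NAME"] d with
    | some v => v
    | none =>
      if d.contains "NAME" then
        let name_value := (d.get? "NAME").getD ""
        if !(pvBadWords.any (fun w => PySem.Str.isIn w (PySem.Str.upper name_value))) &&
            decide ((PySem.Str.split₀ name_value).length ≤ 3) then name_value
        else ""
      else ""
  else if column_upper == "PHONE NO." then
    (pvTryKeys ["PHONE NO", "PERSONAL PHONE NO", "PHONE NUMBER", "PHONE"] d).getD ""
  else if column_upper == "BANK NAME" then
    (pvTryKeys ["BANK NAME", "PERSONAL BANK NAME", "BANK"] d).getD ""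
  else if column_upper == "ACNT. NO." then
    (pvTryKeys ["ACNT NO", "ACCOUNT NO", "PERSONAL ACNT NO", "ACC NO"] d).getD ""
  else if column_upper == "SEX" then
    d.getD "SEX" ""
  else
    if d.contains column then (d.get? column).getD ""
    else pvCiScan d.keys d column_upper

-- ===== PORT B =====
def pvCandidates : PySem.Dict String (List String) :=
  PySem.Dict.mk
    [("NAME OF COOPERATIVE", ["CO-OP NAME", "COOP NAME", "COOPERATIVE NAME", "ORGANIZATION NAME"]),
     ("PHONE NO.", ["PHONE NO", "PERSONAL PHONE NO", "PHONE NUMBER", "PHONE"]),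
     ("BANK NAME", ["BANK NAME", "PERSONAL BANK NAME", "BANK"]),
     ("ACNT. NO.", ["ACNT NO", "ACCOUNT NO", "PERSONAL ACNT NO", "ACC NO"])]

-- the loop body: keep the lowest-ranked candidate hit seen so far (ties → earlier entry)
def pvBestStep (ranks : PySem.Dict String Int) (best : Option (Int × String))
    (kv : String × String) : Option (Int × String) :=
  match ranks.get? kv.1 with
  | none => best
  | some r =>
    match best with
    | none => some (r, kv.2)
    | some b => if r < b.1 then some (r, kv.2) else best

def pvLookupMin (cands : List String) (record_dict : List (String × String)) : String :=
  let ranks : PySem.Dict String Int :=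
    PySem.Dict.ofList ((PySem.List.enumerate cands).map (fun p => (p.2, p.1)))
  match record_dict.foldl (pvBestStep ranks) none with
  | some b => b.2
  | none => ""

-- 'for k in (…): v = record_dict.get(k); if v is not None: return v'
def pvGetChain (ks : List String) (d : PySem.Dict String String) : Option String :=
  match ks with
  | [] => none
  | k :: rest =>
    match d.get? k with
    | some v => some v
    | none => pvGetChain rest d

-- one-pass custom-column loop body: first exact match and first case-insensitive match
def pvPairStep (column cu : String) (ec : Option String × Option String)
    (kv : String × String) : Option String × Option String :=
  (if ec.1.isNone && (kv.1 == column) then some kv.2 else ec.1,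
   if ec.2.isNone && (PySem.Str.upper kv.1 == cu) then some kv.2 else ec.2)

def map_column_to_data_alt (column : String) (record_dict : List (String × String)) : String :=
  let column_upper := PySem.Str.upper column
  match pvCandidates.get? column_upper with
  | some cands => pvLookupMin cands record_dict
  | none =>
    let d : PySem.Dict String String := PySem.Dict.mk record_dict
    if column_upper == "CEO NAME" then
      match pvGetChain ["CEO NAME", "PERSONAL NAME"] d with
      | some v => v
      | none =>
        match d.get? "NAME" with
        | some v =>
          if decide ((PySem.Str.split₀ v).length ≤ 3) &&
              !(pvBadWords.any (fun w => PySem.Str.isIn w (PySem.Str.upper v))) then v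
          else ""
        | none => ""
    else if column_upper == "SEX" then
      d.getD "SEX" ""
    else
      let ec := record_dict.foldl (pvPairStep column column_upper) (none, none)
      match ec.1 with
      | some v => v
      | none =>
        match ec.2 with
        | some v => v
        | none => ""

-- ===== PRECONDITION & SPEC =====
def Spec_map_column_to_data (column : String) (record_dict : List (String × String)) (out : String) : Prop := out = map_column_to_data_alt column record_dict
instance (column : String) (record_dict : List (String × String)) (out : String) : Decidable (Spec_map_column_to_data column record_dict out) := by unfold Spec_map_column_to_data; infer_instance

-- ===== CLAIM (what is proved, stated in full; the proofs are below) =====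
def Claim_equal_map_column_to_data : Prop := ∀ (column : String) (record_dict : List (String × String)), Dom_map_column_to_data column record_dict → Spec_map_column_to_data column record_dict (map_column_to_data column record_dict)

-- ===== LEMMAS AND PROOFS =====

-- combine an earlier best with a later best: the later wins only with a strictly smaller rank
def pvComb (b m : Option (Int × String)) : Option (Int × String) :=
  match b, m with
  | none, m => m
  | some b, none => some b
  | some b, some m => if m.1 < b.1 then some m else some b

-- right-recursive characterisation of the single pass
def pvBestR (ranks : PySem.Dict String Int) (d : List (String × String)) : Option (Int × String) :=
  match d with
  | [] => none
  | kv :: rest => pvComb ((ranks.get? kv.1).map (fun r => (r, kv.2))) (pvBestR ranks rest)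

theorem pvBestStep_eq_comb (ranks : PySem.Dict String Int) (best : Option (Int × String))
    (kv : String × String) :
    pvBestStep ranks best kv = pvComb best ((ranks.get? kv.1).map (fun r => (r, kv.2))) := by
  rcases h : ranks.get? kv.1 with _ | r <;> rcases best with _ | b <;>
    simp [pvBestStep, pvComb, h]

theorem pvComb_assoc (a b c : Option (Int × String)) :
    pvComb (pvComb a b) c = pvComb a (pvComb b c) := by
  rcases a with _ | ⟨ra, va⟩
  · rfl
  · rcases b with _ | ⟨rb, vb⟩
    · rfl
    · rcases c with _ | ⟨rc, vc⟩
      · simp only [pvComb]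
        split_ifs <;> rfl
      · by_cases h1 : rb < ra <;> by_cases h2 : rc < rb <;> by_cases h3 : rc < ra <;>
          simp [pvComb, h1, h2, h3] <;> omega

theorem pvFoldl_eq_bestR (ranks : PySem.Dict String Int) (d : List (String × String)) :
    ∀ best, d.foldl (pvBestStep ranks) best = pvComb best (pvBestR ranks d) := by
  induction d with
  | nil => intro best; rcases best with _ | b <;> simp [pvComb, pvBestR]
  | cons kv rest ih =>
    intro best
    simp only [List.foldl_cons, ih, pvBestStep_eq_comb, pvBestR, pvComb_assoc]

theorem pvGet_mk_mem {ν : Type} (rl : List (String × ν)) (x : String) (r : ν)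
    (h : (PySem.Dict.mk rl).get? x = some r) : ∃ q ∈ rl, q.2 = r := by
  unfold PySem.Dict.get? at h
  rcases hf : List.find? (fun p => p.1 == x) rl with _ | q <;> rw [hf] at h
  · simp at h
  · simp only [Option.map_some] at h
    exact ⟨q, List.mem_of_find?_eq_some hf, Option.some.inj h⟩

theorem pvBestR_rank_mem (rl : List (String × Int)) (d : List (String × String))
    (p : Int × String) (h : pvBestR (PySem.Dict.mk rl) d = some p) : ∃ q ∈ rl, q.2 = p.1 := by
  induction d with
  | nil => simp [pvBestR] at h
  | cons kv rest ih =>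
    rw [pvBestR] at h
    rcases hg : (PySem.Dict.mk rl).get? kv.1 with _ | r <;> rw [hg] at h
    · exact ih (by simpa [pvComb] using h)
    · rcases hr : pvBestR (PySem.Dict.mk rl) rest with _ | p' <;> rw [hr] at h
      · simp only [Option.map_some, pvComb] at h
        obtain rfl := Option.some.inj h
        obtain ⟨q, hq1, hq2⟩ := pvGet_mk_mem rl kv.1 r hg
        exact ⟨q, hq1, hq2⟩
      · simp only [Option.map_some, pvComb] at h
        split_ifs at h
        · exact ih (hr.trans h)
        · obtain rfl := Option.some.inj h
          obtain ⟨q, hq1, hq2⟩ := pvGet_mk_mem rl kv.1 r hg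
          exact ⟨q, hq1, hq2⟩

theorem pvBestR_nil_ranks (d : List (String × String)) :
    pvBestR (PySem.Dict.mk ([] : List (String × Int))) d = none := by
  induction d with
  | nil => rfl
  | cons kv rest ih => simp [pvBestR, PySem.Dict.get?, pvComb, ih]

theorem pvBestR_cons (k : String) (r : Int) (rl : List (String × Int))
    (hlt : ∀ p ∈ rl, r < p.2) (d : List (String × String)) :
    pvBestR (PySem.Dict.mk ((k, r) :: rl)) d =
      match (PySem.Dict.mk d).get? k with
      | some v => some (r, v)
      | none => pvBestR (PySem.Dict.mk rl) d := by
  induction d with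
  | nil => simp [pvBestR, PySem.Dict.get?]
  | cons kv rest ih =>
    obtain ⟨k0, v0⟩ := kv
    rw [pvBestR, PySem.Dict.get?_mk_cons, PySem.Dict.get?_mk_cons, ih]
    by_cases hk : k = k0
    · subst hk
      simp only [beq_self_eq_true, if_true, Option.map_some]
      rcases hg2 : (PySem.Dict.mk rest).get? k with _ | v <;> simp only [hg2]
      · rcases hb : pvBestR (PySem.Dict.mk rl) rest with _ | p <;> simp only [hb, pvComb]
        obtain ⟨q, hq1, hq2⟩ := pvBestR_rank_mem rl rest p hb
        have : ¬ (p.1 < r) := by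
          have := hlt q hq1
          omega
        rw [if_neg this]
      · simp only [pvComb]
        rw [if_neg (by omega)]
    · have hkb : (k == k0) = false := by simp [hk]
      have hkb2 : (k0 == k) = false := by simp [Ne.symm hk]
      simp only [hkb, hkb2, Bool.false_eq_true, if_false]
      rcases hgr : (PySem.Dict.mk rest).get? k with _ | v <;> simp only [hgr]
      · conv_rhs => rw [pvBestR]
      · rcases hg2 : (PySem.Dict.mk rl).get? k0 with _ | r0
        · simp [pvComb, hg2]
        · obtain ⟨q, hq1, hq2⟩ := pvGet_mk_mem rl k0 r0 hg2
          have hlt2 : r < r0 := by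
            have := hlt q hq1
            omega
          simp [pvComb, hg2, hlt2]

theorem pvMin_eq_chain (rl : List (String × Int))
    (hs : rl.Pairwise (fun p q => p.2 < q.2)) (d : List (String × String)) :
    (match pvBestR (PySem.Dict.mk rl) d with
     | some b => b.2
     | none => "") = (pvTryKeys (rl.map (·.1)) (PySem.Dict.mk d)).getD "" := by
  induction rl with
  | nil => simp [pvBestR_nil_ranks, pvTryKeys]
  | cons p rl ih =>
    obtain ⟨k, r⟩ := p
    obtain ⟨hlt, hs'⟩ := List.pairwise_cons.mp hs
    rw [pvBestR_cons k r rl (fun q hq => hlt q hq) d]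
    rw [List.map_cons, pvTryKeys, PySem.Dict.contains_eq_isSome_get?]
    rcases hg : (PySem.Dict.mk d).get? k with _ | v
    · simpa using ih hs'
    · simp [hg]

-- A's membership-probe loop equals B's get-based loop
theorem pvTryKeys_eq_getChain (ks : List String) (d : PySem.Dict String String) :
    pvTryKeys ks d = pvGetChain ks d := by
  induction ks with
  | nil => rfl
  | cons k rest ih =>
    rw [pvTryKeys, pvGetChain, PySem.Dict.contains_eq_isSome_get?]
    rcases h : d.get? k with _ | v <;> simp [h, ih]

-- one instantiation step: the table branch equals A's probe chain
theorem pvLookupMin_eq (cands : List String) (rl : List (String × Int))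
    (hR : (PySem.Dict.ofList ((PySem.List.enumerate cands).map (fun p => (p.2, p.1))) : PySem.Dict String Int) = PySem.Dict.mk rl)
    (hmap : rl.map (·.1) = cands)
    (hs : rl.Pairwise (fun p q => p.2 < q.2)) (d : List (String × String)) :
    pvLookupMin cands d = (pvTryKeys cands (PySem.Dict.mk d)).getD "" := by
  simp only [pvLookupMin]
  rw [hR, pvFoldl_eq_bestR]
  have h0 : pvComb none (pvBestR (PySem.Dict.mk rl) d) = pvBestR (PySem.Dict.mk rl) d := rfl
  rw [h0, ← hmap]
  exact pvMin_eq_chain rl hs d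

-- the fused custom-column pass computes the first exact and first case-insensitive matches
theorem pvPair_foldl (column cu : String) (d : List (String × String)) :
    ∀ e c, d.foldl (pvPairStep column cu) (e, c) =
      ((match e with
        | some v => some v
        | none => (d.find? (fun kv => kv.1 == column)).map (·.2)),
       (match c with
        | some v => some v
        | none => (d.find? (fun kv => PySem.Str.upper kv.1 == cu)).map (·.2))) := by
  induction d with
  | nil => intro e c; rcases e with _ | v <;> rcases c with _ | w <;> simp
  | cons kv rest ih =>
    intro e c
    rw [List.foldl_cons, pvPairStep, ih]
    rw [List.find?_cons, List.find?_cons]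
    rcases e with _ | v <;> rcases c with _ | w <;>
      rcases h1 : (kv.1 == column) with _ | _ <;>
      rcases h2 : (PySem.Str.upper kv.1 == cu) with _ | _ <;> simp

theorem pvCiScan_eq_find (keys : List String) (d : PySem.Dict String String) (cu : String) :
    pvCiScan keys d cu =
      match keys.find? (fun k => PySem.Str.upper k == cu) with
      | some k => (d.get? k).getD ""
      | none => "" := by
  induction keys with
  | nil => rfl
  | cons k rest ih =>
    rw [pvCiScan, List.find?_cons]
    rcases h : (PySem.Str.upper k == cu) with _ | _ <;> simp [h, ih]

theorem pvFirst_key_lookup (d : List (String × String)) (p : String → Bool)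
    (kv₀ : String × String) (h : d.find? (fun kv => p kv.1) = some kv₀) :
    (PySem.Dict.mk d).get? kv₀.1 = some kv₀.2 := by
  induction d with
  | nil => simp at h
  | cons kv rest ih =>
    obtain ⟨k, v⟩ := kv
    rw [List.find?_cons] at h
    rcases hp : p k with _ | _ <;> rw [hp] at h
    · simp only at h
      have hp0 : p kv₀.1 = true := by
        have := List.find?_some h
        simpa using this
      have hne : (k == kv₀.1) = false := by
        rw [beq_eq_false_iff_ne]
        intro he
        rw [he, hp0] at hp
        exact Bool.noConfusion hp
      rw [PySem.Dict.get?_mk_cons, hne]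
      simp only [Bool.false_eq_true, if_false]
      exact ih h
    · simp only at h
      obtain rfl := Option.some.inj h
      rw [PySem.Dict.get?_mk_cons]
      simp

theorem pvMain (column : String) (record_dict : List (String × String)) :
    map_column_to_data column record_dict = map_column_to_data_alt column record_dict := by
  unfold map_column_to_data map_column_to_data_alt
  simp only [pvCandidates, PySem.Dict.get?_mk_cons]
  by_cases h1 : PySem.Str.upper column = "NAME OF COOPERATIVE"
  · simp only [h1, String.reduceBEq, String.reduceEq, beq_self_eq_true, if_true, reduceIte,
      Bool.false_eq_true, if_false]
    exact (pvLookupMin_eq _ [("CO-OP NAME", 0), ("COOP NAME", 1), ("COOPERATIVE NAME", 2), ("ORGANIZATION NAME", 3)] (by decide) rfl (by decide) record_dict).symm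
  have hb1 : (PySem.Str.upper column == "NAME OF COOPERATIVE") = false := beq_eq_false_iff_ne.mpr h1
  have hb1' : ("NAME OF COOPERATIVE" == PySem.Str.upper column) = false := beq_eq_false_iff_ne.mpr (Ne.symm h1)
  simp only [hb1, hb1', Bool.false_eq_true, if_false]
  by_cases h2 : PySem.Str.upper column = "CEO NAME"
  · have hemp : (PySem.Dict.mk ([] : List (String × List String))).get? "CEO NAME" = none := rfl
    simp only [h2, String.reduceBEq, String.reduceEq, beq_self_eq_true, if_true, reduceIte,
      Bool.false_eq_true, if_false, hemp]
    rw [pvTryKeys_eq_getChain]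
    rcases hc : pvGetChain ["CEO NAME", "PERSONAL NAME"] (PySem.Dict.mk record_dict) with _ | v <;>
      simp only [hc]
    rw [PySem.Dict.contains_eq_isSome_get?]
    rcases hn : (PySem.Dict.mk record_dict).get? "NAME" with _ | v <;> simp only [hn]
    · simp
    · simp only [Option.isSome_some, if_true, Option.getD_some, Bool.and_comm]
      rfl
  have hb2 : (PySem.Str.upper column == "CEO NAME") = false := beq_eq_false_iff_ne.mpr h2
  simp only [hb2, Bool.false_eq_true, if_false]
  by_cases h3 : PySem.Str.upper column = "PHONE NO."
  · simp only [h3, String.reduceBEq, String.reduceEq, beq_self_eq_true, if_true, reduceIte,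
      Bool.false_eq_true, if_false]
    exact (pvLookupMin_eq _ [("PHONE NO", 0), ("PERSONAL PHONE NO", 1), ("PHONE NUMBER", 2), ("PHONE", 3)] (by decide) rfl (by decide) record_dict).symm
  have hb3 : (PySem.Str.upper column == "PHONE NO.") = false := beq_eq_false_iff_ne.mpr h3
  have hb3' : ("PHONE NO." == PySem.Str.upper column) = false := beq_eq_false_iff_ne.mpr (Ne.symm h3)
  simp only [hb3, hb3', Bool.false_eq_true, if_false]
  by_cases h4 : PySem.Str.upper column = "BANK NAME"
  · simp only [h4, String.reduceBEq, String.reduceEq, beq_self_eq_true, if_true, reduceIte,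
      Bool.false_eq_true, if_false]
    exact (pvLookupMin_eq _ [("BANK NAME", 0), ("PERSONAL BANK NAME", 1), ("BANK", 2)] (by decide) rfl (by decide) record_dict).symm
  have hb4 : (PySem.Str.upper column == "BANK NAME") = false := beq_eq_false_iff_ne.mpr h4
  have hb4' : ("BANK NAME" == PySem.Str.upper column) = false := beq_eq_false_iff_ne.mpr (Ne.symm h4)
  simp only [hb4, hb4', Bool.false_eq_true, if_false]
  by_cases h5 : PySem.Str.upper column = "ACNT. NO."
  · simp only [h5, String.reduceBEq, String.reduceEq, beq_self_eq_true, if_true, reduceIte,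
      Bool.false_eq_true, if_false]
    exact (pvLookupMin_eq _ [("ACNT NO", 0), ("ACCOUNT NO", 1), ("PERSONAL ACNT NO", 2), ("ACC NO", 3)] (by decide) rfl (by decide) record_dict).symm
  have hb5 : (PySem.Str.upper column == "ACNT. NO.") = false := beq_eq_false_iff_ne.mpr h5
  have hb5' : ("ACNT. NO." == PySem.Str.upper column) = false := beq_eq_false_iff_ne.mpr (Ne.symm h5)
  have hemp2 : (PySem.Dict.mk ([] : List (String × List String))).get? (PySem.Str.upper column) = none := rfl
  simp only [hb5, hb5', Bool.false_eq_true, if_false, hemp2]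
  by_cases h6 : PySem.Str.upper column = "SEX"
  · simp only [h6, String.reduceBEq, beq_self_eq_true, if_true, Bool.false_eq_true, if_false]
  have hb6 : (PySem.Str.upper column == "SEX") = false := beq_eq_false_iff_ne.mpr h6
  simp only [hb6, Bool.false_eq_true, if_false]
  rw [pvPair_foldl column (PySem.Str.upper column) record_dict none none]
  simp only []
  rw [PySem.Dict.contains_eq_isSome_get?]
  rcases he : (PySem.Dict.mk record_dict).get? column with _ | v
  · have he' : (record_dict.find? (fun kv => kv.1 == column)).map (·.2) = none := he
    rw [he']
    simp only [Option.isSome_none, Bool.false_eq_true, if_false]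
    rw [pvCiScan_eq_find]
    have hkeys : (PySem.Dict.mk record_dict).keys = record_dict.map (·.1) := rfl
    rw [hkeys, List.find?_map]
    rcases hf : record_dict.find? (fun kv => PySem.Str.upper kv.1 == PySem.Str.upper column) with _ | kv₀
    · have hf2 : List.find? ((fun k => PySem.Str.upper k == PySem.Str.upper column) ∘ (·.1)) record_dict = none := hf
      rw [hf2, hf]
      rfl
    · have hf2 : List.find? ((fun k => PySem.Str.upper k == PySem.Str.upper column) ∘ (·.1)) record_dict = some kv₀ := hf
      rw [hf2, hf]
      simp only [Option.map_some]
      rw [pvFirst_key_lookup record_dict (fun k => PySem.Str.upper k == PySem.Str.upper column) kv₀ hf]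
      rfl
  · have he' : (record_dict.find? (fun kv => kv.1 == column)).map (·.2) = some v := he
    rw [he']
    simp [he]

-- ===== VERDICT (by name: the statement is the Claim_ definition above) =====
theorem map_column_to_data_spec : Claim_equal_map_column_to_data := by
  intro column record_dict _
  unfold Spec_map_column_to_data
  exact pvMain column record_dict
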